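-- pv_equiv track=rewrite | github.com/NVIDIA/TensorRT | tools/experimental/trt-engine-explorer/trex/raw_preprocessing.py | __disambiguate_layer_names
-- ===== SOURCE A (Python) =====
-- from typing import Dict, List, Tuple
--
-- def __disambiguate_layer_names(raw_layers: List) -> List:
--     """If a layer name appears twice we need to disabmiguate it"""
--     names_cnt = {}
--     for raw_layer in raw_layers:
--         name = raw_layer['Name']
--         if name in names_cnt:
--             names_cnt[name] += 1
--             name += "_" + str(names_cnt[name])
--             raw_layer['Name'] = name
--         else:
--             names_cnt[name] = 1
--     return raw_layers
-- ===== SOURCE B (Python) =====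
-- def __disambiguate_layer_names(raw_layers):
--     """If a layer name appears twice we need to disabmiguate it"""
--     groups = {}
--     for i, layer in enumerate(raw_layers):
--         groups.setdefault(layer['Name'], []).append(i)
--     for name, idxs in groups.items():
--         for j, i in enumerate(idxs[1:], start=2):
--             raw_layers[i]['Name'] = name + '_' + str(j)
--     return raw_layers
-- ===== Notes on version B (the rewrite author's own statement) =====
-- stated objective: alternative
-- what changed: Replaced A's single pass with a running name->count dict by an index-build-then-group-iterate shape: first pass groups the indices of each original name into a dict of lists, second pass walks each group and renames every occurrence after the first from its position in the group; still mutates the layer dicts in place and returns the original list.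
import Mathlib
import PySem

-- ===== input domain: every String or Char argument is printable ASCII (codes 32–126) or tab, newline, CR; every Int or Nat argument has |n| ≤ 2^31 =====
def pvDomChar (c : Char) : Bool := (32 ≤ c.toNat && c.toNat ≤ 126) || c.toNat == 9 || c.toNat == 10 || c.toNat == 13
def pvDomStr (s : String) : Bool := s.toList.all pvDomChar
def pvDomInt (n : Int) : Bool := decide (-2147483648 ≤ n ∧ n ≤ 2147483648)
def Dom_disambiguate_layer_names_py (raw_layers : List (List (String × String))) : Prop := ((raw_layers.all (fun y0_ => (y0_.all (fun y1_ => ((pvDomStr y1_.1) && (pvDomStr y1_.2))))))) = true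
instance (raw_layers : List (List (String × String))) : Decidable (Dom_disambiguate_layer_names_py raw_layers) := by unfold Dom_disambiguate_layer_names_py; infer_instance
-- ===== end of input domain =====

-- B replaces A's single pass with a running name->count dict by two staged passes: build a
-- dict grouping the INDICES of each original name, then rename positions 2.. inside each group
-- (alternative decomposition, not faster); equivalence is about the RETURN value — both
-- Pythons mutate the layer dicts in place identically.

-- ===== PORT A =====
-- raw_layer['Name'] (KeyError when absent is excluded by Pre_)
def pvNameA (layer : List (String × String)) : String := (PySem.Dict.mk layer).getD "Name" ""

def pvALoop (cnt : PySem.Dict String Int) : List (List (String × String)) → List (List (String × String))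
  | [] => []
  | layer :: rest =>
    let name := pvNameA layer
    if cnt.contains name then
      let c := cnt.getD name 0 + 1
      (((PySem.Dict.mk layer).insert "Name" (name ++ "_" ++ PySem.Int.toStr c)).items) ::
        pvALoop (cnt.insert name c) rest
    else
      layer :: pvALoop (cnt.insert name 1) rest

def disambiguate_layer_names_py (raw_layers : List (List (String × String))) : List (List (String × String)) :=
  pvALoop PySem.Dict.empty raw_layers

-- ===== PORT B =====
-- Python's enumerate(xs): the (index, element) pairs (indices as Nat; enumerate indices are ≥ 0)
def pvEnumB (xs : List (List (String × String))) : List (Nat × List (String × String)) :=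
  (List.range xs.length).zip xs

-- first loop: groups.setdefault(layer['Name'], []).append(i)  ==  d[name] = d.get(name, []) + [i]
def pvGroups (raw_layers : List (List (String × String))) : PySem.Dict String (List Nat) :=
  (pvEnumB raw_layers).foldl (fun d p => d.modify (pvNameA p.2) [] (· ++ [p.1])) PySem.Dict.empty

-- raw_layers[i]['Name'] = nm  (i is a valid index: it came from enumerate)
def pvRenameAt (ls : List (List (String × String))) (i : Nat) (nm : String) : List (List (String × String)) :=
  ls.set i (((PySem.Dict.mk (ls.getD i [])).insert "Name" nm).items)

-- inner loop: for j, i in enumerate(idxs[1:], start=2): raw_layers[i]['Name'] = name + '_' + str(j)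
def pvApplyGroup (ls : List (List (String × String))) (p : String × List Nat) : List (List (String × String)) :=
  ((List.range' 2 (p.2.drop 1).length).zip (p.2.drop 1)).foldl
    (fun ls q => pvRenameAt ls q.2 (p.1 ++ "_" ++ PySem.Int.toStr (q.1 : Int))) ls

def disambiguate_layer_names_py_alt (raw_layers : List (List (String × String))) : List (List (String × String)) :=
  (pvGroups raw_layers).items.foldl pvApplyGroup raw_layers

-- ===== PRECONDITION & SPEC =====
-- Pre_ excludes exactly the inputs where Python A raises KeyError: a layer without a 'Name' key.
def Pre_disambiguate_layer_names_py (raw_layers : List (List (String × String))) : Prop :=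
  ∀ layer ∈ raw_layers, "Name" ∈ layer.map Prod.fst
instance (raw_layers : List (List (String × String))) : Decidable (Pre_disambiguate_layer_names_py raw_layers) := by unfold Pre_disambiguate_layer_names_py; infer_instance

def pvWitness_disambiguate_layer_names_py : (List (List (String × String))) :=
  [[("Name", "a")], [("Name", "a"), ("k", "v")], [("Name", "b")]]

def Spec_disambiguate_layer_names_py (raw_layers : List (List (String × String))) (out : List (List (String × String))) : Prop := out = disambiguate_layer_names_py_alt raw_layers
instance (raw_layers : List (List (String × String))) (out : List (List (String × String))) : Decidable (Spec_disambiguate_layer_names_py raw_layers out) := by unfold Spec_disambiguate_layer_names_py; infer_instance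

-- ===== CLAIM (what is proved, stated in full; the proofs are below) =====
def Claim_equal_disambiguate_layer_names_py : Prop := ∀ (raw_layers : List (List (String × String))), Dom_disambiguate_layer_names_py raw_layers → Pre_disambiguate_layer_names_py raw_layers → Spec_disambiguate_layer_names_py raw_layers (disambiguate_layer_names_py raw_layers)

-- ===== LEMMAS AND PROOFS =====

-- Pointwise description both ports are reduced to: layer i keeps its dict unless its original
-- name occurs in the prefix, in which case 'Name' is set to name_(prefixcount+1).
def pvExp (raw : List (List (String × String))) (i : Nat) : List (String × String) :=
  if ((raw.map pvNameA).take i).count ((raw.map pvNameA).getD i "") = 0 then raw.getD i []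
  else ((PySem.Dict.mk (raw.getD i [])).insert "Name"
    ((raw.map pvNameA).getD i "" ++ "_"
      ++ PySem.Int.toStr (((((raw.map pvNameA).take i).count ((raw.map pvNameA).getD i "")) : Int) + 1))).items

def pvMapForm (raw : List (List (String × String))) : List (List (String × String)) :=
  (pvEnumB raw).map (fun p =>
    let names := raw.map pvNameA
    let name := names.getD p.1 ""
    let c := (names.take p.1).count name
    if c = 0 then p.2
    else ((PySem.Dict.mk p.2).insert "Name" (name ++ "_" ++ PySem.Int.toStr ((c : Int) + 1))).items)

-- ---- A-side: pvALoop = prefix-count recursion = pvMapForm ----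
def pvGo (pre : List String) : List (List (String × String)) → List (List (String × String))
  | [] => []
  | layer :: rest =>
    let name := pvNameA layer
    let c := pre.count name
    (if c = 0 then layer
     else ((PySem.Dict.mk layer).insert "Name" (name ++ "_" ++ PySem.Int.toStr ((c : Int) + 1))).items) ::
      pvGo (pre ++ [name]) rest

theorem pvALoop_eq_go (rest : List (List (String × String))) :
    ∀ (cnt : PySem.Dict String Int) (pre : List String),
      (∀ n, cnt.get? n = if pre.count n = 0 then none else some (pre.count n)) →
      pvALoop cnt rest = pvGo pre rest := by
  induction rest with
  | nil => intro cnt pre _; rfl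
  | cons layer rest ih =>
    intro cnt pre hinv
    simp only [pvALoop, pvGo]
    by_cases h : pre.count (pvNameA layer) = 0
    · have hc : cnt.contains (pvNameA layer) = false := by
        rw [PySem.Dict.contains_eq_isSome_get?, hinv]; simp [h]
      rw [hc]
      simp only [h, Bool.false_eq_true, if_false]
      congr 1
      apply ih
      intro n
      rw [PySem.Dict.get?_insert]
      by_cases hn : n = pvNameA layer
      · subst hn; simp [List.count_append, h]
      · simp [hn, hinv n, List.count_append, Ne.symm hn]
    · have hc : cnt.contains (pvNameA layer) = true := by
        rw [PySem.Dict.contains_eq_isSome_get?, hinv]; simp [h]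
      have hg : cnt.getD (pvNameA layer) 0 = (pre.count (pvNameA layer) : Int) := by
        rw [PySem.Dict.getD_eq_get?_getD, hinv]; simp [h]
      rw [hc]
      simp only [if_true, hg, h]
      congr 1
      apply ih
      intro n
      rw [PySem.Dict.get?_insert]
      by_cases hn : n = pvNameA layer
      · subst hn; simp [List.count_append]
      · simp [hn, hinv n, List.count_append, Ne.symm hn]

theorem pvMapForm_eq_go (full : List (List (String × String))) :
    ∀ (k : Nat) (rest : List (List (String × String))),
      rest = full.drop k →
      ((List.range' k rest.length).zip rest).map (fun p =>
        let name := (full.map pvNameA).getD p.1 ""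
        let c := ((full.map pvNameA).take p.1).count name
        if c = 0 then p.2
        else ((PySem.Dict.mk p.2).insert "Name" (name ++ "_" ++ PySem.Int.toStr ((c : Int) + 1))).items)
        = pvGo ((full.map pvNameA).take k) rest := by
  intro k rest
  induction rest generalizing k with
  | nil => intro _; rfl
  | cons layer rest ih =>
    intro hk
    have hlen : k < full.length := by
      by_contra hge
      rw [List.drop_eq_nil_of_le (by omega)] at hk
      exact List.cons_ne_nil _ _ hk
    have hget : full[k] = layer := by
      rw [List.drop_eq_getElem_cons hlen] at hk
      exact (List.cons.injEq _ _ _ _ ▸ hk.symm).1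
    have hrest : rest = full.drop (k + 1) := by
      rw [List.drop_eq_getElem_cons hlen] at hk
      exact (List.cons.injEq _ _ _ _ ▸ hk.symm).2.symm
    have hname : (full.map pvNameA).getD k "" = pvNameA layer := by
      rw [List.getD_eq_getElem?_getD, List.getElem?_map]
      simp [hlen, hget]
    have htake : (full.map pvNameA).take (k + 1)
        = (full.map pvNameA).take k ++ [pvNameA layer] := by
      rw [List.take_add_one, List.getElem?_map]
      simp [hlen, hget]
    simp only [List.length_cons, List.range'_succ, List.zip_cons_cons, List.map_cons, pvGo]
    rw [hname]
    congr 1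
    rw [ih (k + 1) hrest, htake]

theorem pvA_eq_mapForm (raw : List (List (String × String))) :
    disambiguate_layer_names_py raw = pvMapForm raw := by
  unfold disambiguate_layer_names_py pvMapForm pvEnumB
  rw [pvALoop_eq_go raw PySem.Dict.empty [] (by simp [PySem.Dict.get?_empty])]
  have h := pvMapForm_eq_go raw 0 raw rfl
  simp only [List.take_zero] at h
  rw [List.range_eq_range']
  exact h.symm

-- ---- B-side helpers ----
def pvP (raw : List (List (String × String))) (name : String) (q : Nat) : Bool :=
  pvNameA (raw.getD q []) == name

-- the indices of the layers originally named `name`, in order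
def pvOcc (raw : List (List (String × String))) (name : String) : List Nat :=
  (List.range raw.length).filter (pvP raw name)

-- number of occurrences of `name` strictly before position i
def pvCnt (raw : List (List (String × String))) (name : String) (i : Nat) : Nat :=
  ((List.range i).filter (pvP raw name)).length

-- generalized inner loop (enumerate(tail, start=j))
def pvInner (nm : String) (ls : List (List (String × String))) (j : Nat) (tail : List Nat) :
    List (List (String × String)) :=
  ((List.range' j tail.length).zip tail).foldl
    (fun ls q => pvRenameAt ls q.2 (nm ++ "_" ++ PySem.Int.toStr (q.1 : Int))) ls

theorem pvApplyGroup_eq_inner (ls : List (List (String × String))) (p : String × List Nat) :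
    pvApplyGroup ls p = pvInner p.1 ls 2 (p.2.drop 1) := rfl

theorem pvInner_cons (nm : String) (ls : List (List (String × String))) (j x : Nat) (t : List Nat) :
    pvInner nm ls j (x :: t)
      = pvInner nm (pvRenameAt ls x (nm ++ "_" ++ PySem.Int.toStr (j : Int))) (j + 1) t := by
  simp [pvInner, List.range'_succ]

theorem pvInner_length (nm : String) (j : Nat) (t : List Nat) :
    ∀ ls, (pvInner nm ls j t).length = ls.length := by
  induction t generalizing j with
  | nil => intro ls; rfl
  | cons x t ih => intro ls; rw [pvInner_cons, ih]; simp [pvRenameAt]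

theorem pvInner_not_mem (nm : String) (j : Nat) (t : List Nat) :
    ∀ ls (i : Nat), i ∉ t → (pvInner nm ls j t)[i]? = ls[i]? := by
  induction t generalizing j with
  | nil => intro ls i _; rfl
  | cons x t ih =>
    intro ls i hi
    have hxi : x ≠ i := fun h => hi (h ▸ List.mem_cons_self)
    rw [pvInner_cons, ih _ _ _ (fun h => hi (List.mem_cons_of_mem _ h))]
    simp only [pvRenameAt]
    rw [List.getElem?_set_ne hxi]

theorem pvInner_mem (nm : String) (t : List Nat) :
    ∀ (j : Nat) ls (p i : Nat), t[p]? = some i → t.Nodup → (∀ x ∈ t, x < ls.length) →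
      (pvInner nm ls j t)[i]?
        = some (((PySem.Dict.mk (ls.getD i [])).insert "Name"
            (nm ++ "_" ++ PySem.Int.toStr ((j + p : Nat) : Int))).items) := by
  induction t with
  | nil => intro j ls p i h; simp at h
  | cons x t ih =>
    intro j ls p i hp hnd hb
    rw [pvInner_cons]
    match p with
    | 0 =>
      have hx : x = i := by simpa using hp
      subst hx
      have hxt : x ∉ t := (List.nodup_cons.mp hnd).1
      rw [pvInner_not_mem _ _ _ _ _ hxt]
      have hxl : x < ls.length := hb x List.mem_cons_self
      simp [pvRenameAt, hxl]
    | p + 1 =>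
      have hp' : t[p]? = some i := by simpa using hp
      have hit : i ∈ t := List.mem_of_getElem? hp'
      have hxt : x ∉ t := (List.nodup_cons.mp hnd).1
      have hxi : x ≠ i := fun h => hxt (h ▸ hit)
      have hgd : (pvRenameAt ls x (nm ++ "_" ++ PySem.Int.toStr (j : Int))).getD i []
          = ls.getD i [] := by
        simp [pvRenameAt, List.getD_eq_getElem?_getD]
        rw [List.getElem?_set_ne hxi]
      rw [ih (j + 1) _ p i hp' (List.nodup_cons.mp hnd).2
        (fun y hy => by simpa [pvRenameAt] using hb y (List.mem_cons_of_mem _ hy))]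
      rw [hgd]
      have hjp : j + 1 + p = j + (p + 1) := by omega
      rw [hjp]

-- ---- characterizing pvGroups ----
theorem pv_zip_filter (xs : List (List (String × String))) (name : String) :
    ∀ k, (((List.range' k xs.length).zip xs).filter (fun p => pvNameA p.2 == name)).map (fun p => p.1)
      = (List.range' k xs.length).filter (fun i => pvNameA (xs.getD (i - k) []) == name) := by
  induction xs with
  | nil => intro k; rfl
  | cons x t ih =>
    intro k
    simp only [List.length_cons, List.range'_succ, List.zip_cons_cons, List.filter_cons]
    have hk : (k : Nat) - k = 0 := Nat.sub_self k
    rw [show ((x :: t).getD (k - k) []) = x by rw [hk]; rfl]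
    have htail : (List.range' (k + 1) t.length).filter
          (fun i => pvNameA ((x :: t).getD (i - k) []) == name)
        = (List.range' (k + 1) t.length).filter
          (fun i => pvNameA (t.getD (i - (k + 1)) []) == name) := by
      apply List.filter_congr
      intro i hi
      have hik : k + 1 ≤ i := (List.mem_range'_1.mp hi).1
      have : i - k = (i - (k + 1)) + 1 := by omega
      rw [this]
      rfl
    by_cases h : (pvNameA x == name) = true
    · simp only [h, if_true, List.map_cons, ih (k + 1), htail]
    · simp only [h, Bool.false_eq_true, if_false, ih (k + 1), htail]

theorem pvGroups_getD (raw : List (List (String × String))) (name : String) :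
    (pvGroups raw).getD name [] = pvOcc raw name := by
  have hfold : pvGroups raw
      = ((pvEnumB raw).map (fun p => (pvNameA p.2, p.1))).foldl
          (fun d q => d.modify q.1 [] (· ++ [q.2])) PySem.Dict.empty := by
    rw [List.foldl_map]; rfl
  rw [hfold, PySem.Dict.getD_foldl_modify_append]
  rw [List.filter_map]
  rw [List.map_map]
  have : ((pvEnumB raw).filter ((fun q => q.1 == name) ∘ (fun p => (pvNameA p.2, p.1)))).map
        ((fun q : String × Nat => q.2) ∘ (fun p : Nat × List (String × String) => (pvNameA p.2, p.1)))
      = ((pvEnumB raw).filter (fun p => pvNameA p.2 == name)).map (fun p => p.1) := rfl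
  rw [this]
  unfold pvEnumB pvOcc
  rw [List.range_eq_range', pv_zip_filter raw name 0]
  apply List.filter_congr
  intro a _
  simp [pvP, List.getD_eq_getElem?_getD]

theorem pvGroups_keys (raw : List (List (String × String))) :
    (pvGroups raw).keys = PySem.Set.ofList (raw.map pvNameA) := by
  unfold pvGroups
  rw [PySem.Dict.keys_foldl_modify_key]
  have hmap : (pvEnumB raw).map (fun p => pvNameA p.2) = raw.map pvNameA := by
    unfold pvEnumB
    rw [show (fun p : Nat × List (String × String) => pvNameA p.2) = pvNameA ∘ Prod.snd from rfl]
    rw [← List.map_map]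
    rw [List.map_snd_zip (by simp)]
  rw [hmap, PySem.Dict.keys_empty, PySem.Set.ofList_eq_foldl]
  rfl

theorem pvGroups_nodup (raw : List (List (String × String))) :
    (pvGroups raw).keys.Nodup := by
  unfold pvGroups
  exact PySem.Dict.nodup_keys_foldl_modify_key _ _ _ _ _ PySem.Dict.nodup_keys_empty

-- ---- occ / cnt facts ----
theorem pv_mem_occ (raw : List (List (String × String))) (name : String) (i : Nat) :
    i ∈ pvOcc raw name ↔ i < raw.length ∧ pvP raw name i = true := by
  simp [pvOcc, List.mem_filter, List.mem_range]

theorem pvOcc_pairwise (raw : List (List (String × String))) (name : String) :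
    (pvOcc raw name).Pairwise (· < ·) :=
  (List.pairwise_lt_range).filter _

theorem pvOcc_nodup (raw : List (List (String × String))) (name : String) :
    (pvOcc raw name).Nodup :=
  (pvOcc_pairwise raw name).imp Nat.ne_of_lt

theorem pv_sorted_filter_take (l : List Nat) (hs : l.Pairwise (· < ·)) :
    ∀ (p i : Nat), l[p]? = some i → l.filter (fun q => decide (q < i)) = l.take p := by
  induction l with
  | nil => intro p i h; simp at h
  | cons x t ih =>
    intro p i hp
    have hx : ∀ y ∈ t, x < y := fun y hy => List.rel_of_pairwise_cons hs hy
    match p with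
    | 0 =>
      have : x = i := by simpa using hp
      subst this
      simp only [List.take_zero, List.filter_cons]
      rw [if_neg (by simp)]
      rw [List.filter_eq_nil_iff.mpr (fun y hy => by simp [Nat.not_lt.mpr (Nat.le_of_lt (hx y hy))])]
    | p + 1 =>
      have hp' : t[p]? = some i := by simpa using hp
      have hit : i ∈ t := List.mem_of_getElem? hp'
      simp only [List.take_succ_cons, List.filter_cons]
      rw [if_pos (by simp [hx i hit])]
      rw [ih (List.Pairwise.sublist (List.sublist_cons_self x t) hs) p i hp']

theorem pvCnt_occ (raw : List (List (String × String))) (name : String) (p i : Nat)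
    (h : (pvOcc raw name)[p]? = some i) : pvCnt raw name i = p := by
  have hplen : p < (pvOcc raw name).length := (List.getElem?_eq_some_iff.mp h).1
  have hmem : i ∈ pvOcc raw name := List.mem_of_getElem? h
  have hin : i < raw.length := ((pv_mem_occ raw name i).mp hmem).1
  have h1 : (pvOcc raw name).filter (fun q => decide (q < i)) = (pvOcc raw name).take p :=
    pv_sorted_filter_take _ (pvOcc_pairwise raw name) p i h
  have h2 : (List.range i).filter (pvP raw name)
      = (pvOcc raw name).filter (fun q => decide (q < i)) := by
    obtain ⟨m, hm⟩ : ∃ m, raw.length = i + m := ⟨raw.length - i, by omega⟩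
    unfold pvOcc
    rw [List.filter_filter, hm, List.range_add, List.filter_append]
    have hlow : (List.range i).filter (fun a => decide (a < i) && pvP raw name a)
        = (List.range i).filter (pvP raw name) := by
      apply List.filter_congr
      intro a ha
      simp [List.mem_range.mp ha]
    have hhigh : ((List.range m).map (i + ·)).filter
        (fun a => decide (a < i) && pvP raw name a) = [] := by
      apply List.filter_eq_nil_iff.mpr
      intro a ha
      obtain ⟨b, _, hb⟩ := List.mem_map.mp ha
      simp [← hb]
    rw [hlow, hhigh, List.append_nil]
  unfold pvCnt
  rw [h2, h1, List.length_take]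
  omega

-- bridge to the names list used by pvExp / pvMapForm
theorem pv_names_getD (raw : List (List (String × String))) (i : Nat) (h : i < raw.length) :
    (raw.map pvNameA).getD i "" = pvNameA (raw.getD i []) := by
  rw [List.getD_eq_getElem?_getD, List.getElem?_map, List.getD_eq_getElem?_getD]
  simp [h]

theorem pv_count_take (raw : List (List (String × String))) (name : String) :
    ∀ (i : Nat), i ≤ raw.length →
      ((raw.map pvNameA).take i).count name = pvCnt raw name i := by
  intro i
  induction i with
  | zero => intro _; simp [pvCnt]
  | succ i ih =>
    intro hle
    have hi : i < raw.length := by omega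
    rw [List.take_add_one, List.count_append, ih (by omega)]
    unfold pvCnt
    rw [List.range_succ, List.filter_append, List.length_append]
    congr 1
    have hget : (raw.map pvNameA)[i]? = some (pvNameA (raw.getD i [])) := by
      rw [List.getElem?_map, List.getD_eq_getElem?_getD]
      simp [hi]
    rw [hget]
    by_cases h : (pvP raw name i) = true
    · have hb : (pvNameA (raw.getD i []) == name) = true := h
      simp [h, List.getD_eq_getElem?_getD] at *
      simp [hb]
    · have hb : (pvNameA (raw.getD i []) == name) = false := by
        simpa [pvP] using h
      simp [h, List.getD_eq_getElem?_getD] at *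
      simp [hb]

-- ---- pvMapForm elementwise ----
theorem pvMapForm_length (raw : List (List (String × String))) :
    (pvMapForm raw).length = raw.length := by
  simp [pvMapForm, pvEnumB]

theorem pvMapForm_getElem? (raw : List (List (String × String))) (i : Nat) (h : i < raw.length) :
    (pvMapForm raw)[i]? = some (pvExp raw i) := by
  unfold pvMapForm pvEnumB pvExp
  rw [List.getElem?_map]
  have hz : ((List.range raw.length).zip raw)[i]? = some (i, raw.getD i []) := by
    have hlen : i < ((List.range raw.length).zip raw).length := by
      simp [List.length_zip, h]
    rw [List.getElem?_eq_getElem hlen, List.getElem_zip]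
    simp [List.getD_eq_getElem?_getD, List.getElem?_eq_getElem h]
  rw [hz]
  rfl

-- ---- outer fold ----
theorem pvOuter (raw : List (List (String × String))) :
    ∀ (ks : List String) (ls : List (List (String × String))), ks.Nodup →
      ls.length = raw.length →
      (∀ i, i < raw.length →
        ls[i]? = (if pvNameA (raw.getD i []) ∈ ks then raw[i]? else some (pvExp raw i))) →
      ((ks.foldl (fun ls k => pvApplyGroup ls (k, pvOcc raw k)) ls).length = raw.length ∧
        ∀ i, i < raw.length →
          (ks.foldl (fun ls k => pvApplyGroup ls (k, pvOcc raw k)) ls)[i]? = some (pvExp raw i)) := by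
  intro ks
  induction ks with
  | nil =>
    intro ls _ hlen hinv
    refine ⟨hlen, fun i hi => ?_⟩
    simpa using hinv i hi
  | cons k t ih =>
    intro ls hnd hlen hinv
    simp only [List.foldl_cons]
    rw [pvApplyGroup_eq_inner]
    have htlnd : ((pvOcc raw k).drop 1).Nodup :=
      (pvOcc_nodup raw k).sublist (List.drop_sublist 1 _)
    have hb : ∀ x ∈ (pvOcc raw k).drop 1, x < ls.length := by
      intro x hx
      rw [hlen]
      exact ((pv_mem_occ raw k x).mp (List.mem_of_mem_drop hx)).1
    have hchar : ∀ i, i < raw.length →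
        (pvInner k ls 2 ((pvOcc raw k).drop 1))[i]?
          = (if pvNameA (raw.getD i []) ∈ t then raw[i]? else some (pvExp raw i)) := by
      intro i hi
      by_cases hk : pvNameA (raw.getD i []) = k
      · have himem : i ∈ pvOcc raw k := (pv_mem_occ raw k i).mpr ⟨hi, by unfold pvP; rw [hk]; simp⟩
        have hknot_t : k ∉ t := (List.nodup_cons.mp hnd).1
        rw [if_neg (hk ▸ hknot_t)]
        obtain ⟨h0, tl, hocc⟩ := List.exists_cons_of_ne_nil (List.ne_nil_of_mem himem)
        have htl : (pvOcc raw k).drop 1 = tl := by rw [hocc]; rfl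
        have hlsraw : ls[i]? = raw[i]? := by
          rw [hinv i hi, if_pos (by rw [hk]; exact List.mem_cons_self)]
        rcases List.mem_cons.mp (hocc ▸ himem) with hih | hitl
        · have hnotin : i ∉ tl := by
            have := hocc ▸ pvOcc_nodup raw k
            exact hih ▸ (List.nodup_cons.mp this).1
          rw [htl, pvInner_not_mem _ _ _ _ _ hnotin]
          have hc0 : pvCnt raw k i = 0 :=
            pvCnt_occ raw k 0 i (by rw [hocc, hih]; rfl)
          have hexp : pvExp raw i = raw.getD i [] := by
            unfold pvExp
            rw [pv_names_getD raw i hi, hk, pv_count_take raw k i (le_of_lt hi), hc0]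
            simp
          rw [hexp, hlsraw, List.getD_eq_getElem?_getD, List.getElem?_eq_getElem hi]
          rfl
        · obtain ⟨p, hp⟩ := List.mem_iff_getElem?.mp hitl
          have hocc_p : (pvOcc raw k)[p + 1]? = some i := by rw [hocc]; simpa using hp
          have hcnt : pvCnt raw k i = p + 1 := pvCnt_occ raw k (p + 1) i hocc_p
          rw [htl]
          rw [pvInner_mem k tl 2 ls p i hp (htl ▸ htlnd) (htl ▸ hb)]
          have hgd : ls.getD i [] = raw.getD i [] := by
            rw [List.getD_eq_getElem?_getD, List.getD_eq_getElem?_getD, hlsraw]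
          have hcast : ((p + 1 : Nat) : Int) + 1 = ((2 + p : Nat) : Int) := by
            push_cast; ring
          have hexp : pvExp raw i
              = ((PySem.Dict.mk (raw.getD i [])).insert "Name"
                  (k ++ "_" ++ PySem.Int.toStr ((2 + p : Nat) : Int))).items := by
            unfold pvExp
            rw [pv_names_getD raw i hi, hk, pv_count_take raw k i (le_of_lt hi), hcnt]
            rw [if_neg (by omega), hcast]
          rw [hexp, hgd]
      · have hnotin : i ∉ (pvOcc raw k).drop 1 := by
          intro hmem
          exact hk (by simpa [pvP] using ((pv_mem_occ raw k i).mp (List.mem_of_mem_drop hmem)).2)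
        rw [pvInner_not_mem _ _ _ _ _ hnotin, hinv i hi]
        by_cases ht : pvNameA (raw.getD i []) ∈ t
        · rw [if_pos (List.mem_cons_of_mem _ ht), if_pos ht]
        · rw [if_neg (fun hmem => (List.mem_cons.mp hmem).elim (fun h' => hk h') (fun h' => ht h')), if_neg ht]
    exact ih _ (List.nodup_cons.mp hnd).2
      (by rw [pvInner_length, hlen]) hchar

theorem pvB_eq_mapForm (raw : List (List (String × String))) :
    disambiguate_layer_names_py_alt raw = pvMapForm raw := by
  unfold disambiguate_layer_names_py_alt
  rw [PySem.Dict.items_eq_map_keys (pvGroups raw) (pvGroups_nodup raw) []]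
  rw [List.foldl_map]
  rw [show (fun x y => pvApplyGroup x (y, (pvGroups raw).getD y []))
      = (fun ls k => pvApplyGroup ls (k, pvOcc raw k))
    from funext fun a => funext fun b => by rw [pvGroups_getD]]
  have hinit : ∀ i, i < raw.length →
      raw[i]? = (if pvNameA (raw.getD i []) ∈ (pvGroups raw).keys then raw[i]?
                 else some (pvExp raw i)) := by
    intro i hi
    rw [if_pos ?_]
    rw [pvGroups_keys, PySem.Set.mem_ofList]
    refine List.mem_map.mpr ⟨raw.getD i [], ?_, rfl⟩
    rw [List.getD_eq_getElem?_getD, List.getElem?_eq_getElem hi]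
    exact List.getElem_mem hi
  have hks := pvOuter raw (pvGroups raw).keys raw (pvGroups_nodup raw) rfl hinit
  apply List.ext_getElem?
  intro i
  by_cases hi : i < raw.length
  · rw [hks.2 i hi, pvMapForm_getElem? raw i hi]
  · rw [List.getElem?_eq_none (by rw [hks.1]; omega),
      List.getElem?_eq_none (by rw [pvMapForm_length]; omega)]

-- ===== VERDICT (by name: the statement is the Claim_ definition above) =====
theorem disambiguate_layer_names_py_spec : Claim_equal_disambiguate_layer_names_py := by
  intro raw_layers _ _
  unfold Spec_disambiguate_layer_names_py
  rw [pvA_eq_mapForm, pvB_eq_mapForm]
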